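-- pv_equiv track=rewrite | github.com/jinlukang1/python-for-UGpaper | DataProcessing.py | TestMissValue
-- ===== SOURCE A (Python) =====
-- def get_elements(element, DS):
--     list_1 = []
--     for _ in range(len(DS)):
--         list_1.append(DS[_][element])
--     return list_1
--
-- def TestMissValue(element, DS):
--     count = 0
--
--     list_2 = get_elements(element, DS)
--
--     for i in range(len(list_2)):
--         if list_2[i] == '0':
--             count = count
--         elif list_2[i] == '3':
--             count = count
--         elif list_2[i] == '4':
--             count = count
--         else:
--             count = count + 1
--
--     return count
-- ===== SOURCE B (Python) =====
-- def TestMissValue(element, DS):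
--     c = {}
--     for row in DS:
--         v = row[element]
--         c[v] = c.get(v, 0) + 1
--     return len(DS) - c.get('0', 0) - c.get('3', 0) - c.get('4', 0)
-- ===== Notes on version B (the rewrite author's own statement) =====
-- stated objective: alternative
-- what changed: Replaces the helper that copies the column plus a per-element branch chain by a single pass that builds a frequency dictionary of the column and returns len(DS) minus the counts of '0', '3' and '4'.
import Mathlib
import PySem

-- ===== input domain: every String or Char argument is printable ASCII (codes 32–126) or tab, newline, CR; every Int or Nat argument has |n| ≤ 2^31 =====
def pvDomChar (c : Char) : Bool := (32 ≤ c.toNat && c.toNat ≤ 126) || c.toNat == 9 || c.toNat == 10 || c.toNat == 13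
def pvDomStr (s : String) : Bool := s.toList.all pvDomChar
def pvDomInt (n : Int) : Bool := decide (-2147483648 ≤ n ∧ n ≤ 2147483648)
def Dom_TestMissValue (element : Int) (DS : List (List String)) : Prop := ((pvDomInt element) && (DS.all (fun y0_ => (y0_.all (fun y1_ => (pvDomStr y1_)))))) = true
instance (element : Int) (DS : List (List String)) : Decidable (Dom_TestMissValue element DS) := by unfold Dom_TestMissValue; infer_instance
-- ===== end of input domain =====

-- B replaces A's column-copy helper and per-element branch chain by a frequency dictionary of the column, returning len(DS) minus the counts of '0','3','4' (alternative decomposition, same cost).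


-- ===== PORT A =====
-- get_elements: copies the column DS[_][element] row by row (pyGetD is exact under Pre_, where every index is in range)
def get_elements (element : Int) (DS : List (List String)) : List String :=
  (PySem.List.pyRange 0 DS.length 1).foldl
    (fun list_1 i => list_1 ++ [PySem.List.pyGetD (PySem.List.pyGetD DS i []) element ""]) []

def TestMissValue (element : Int) (DS : List (List String)) : Int :=
  (PySem.List.pyRange 0 (get_elements element DS).length 1).foldl
    (fun count i =>
      if PySem.List.pyGetD (get_elements element DS) i "" = "0" then count
      else if PySem.List.pyGetD (get_elements element DS) i "" = "3" then count
      else if PySem.List.pyGetD (get_elements element DS) i "" = "4" then count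
      else count + 1) 0

-- ===== PORT B =====
def b_counter (element : Int) (DS : List (List String)) : PySem.Dict String Int :=
  DS.foldl
    (fun d row =>
      d.insert (PySem.List.pyGetD row element "")
        (d.getD (PySem.List.pyGetD row element "") 0 + 1)) PySem.Dict.empty

def TestMissValue_alt (element : Int) (DS : List (List String)) : Int :=
  (DS.length : Int) - (b_counter element DS).getD "0" 0
    - (b_counter element DS).getD "3" 0 - (b_counter element DS).getD "4" 0

-- ===== PRECONDITION & SPEC =====
-- Pre_: A raises IndexError when 'element' is out of range for some row; exactly those inputs are excluded.
def Pre_TestMissValue (element : Int) (DS : List (List String)) : Prop :=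
  ∀ row ∈ DS, PySem.Raise.InRange row.length element
instance (element : Int) (DS : List (List String)) : Decidable (Pre_TestMissValue element DS) := by unfold Pre_TestMissValue; infer_instance
def pvWitness_TestMissValue : Int × List (List String) := (0, [["1"], ["0"], ["3"]])
def Spec_TestMissValue (element : Int) (DS : List (List String)) (out : Int) : Prop := out = TestMissValue_alt element DS
instance (element : Int) (DS : List (List String)) (out : Int) : Decidable (Spec_TestMissValue element DS out) := by unfold Spec_TestMissValue; infer_instance

-- ===== CLAIM (what is proved, stated in full; the proofs are below) =====
def Claim_equal_TestMissValue : Prop := ∀ (element : Int) (DS : List (List String)), Dom_TestMissValue element DS → Pre_TestMissValue element DS → Spec_TestMissValue element DS (TestMissValue element DS)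

-- ===== LEMMAS AND PROOFS =====

-- the column as a map
lemma get_elements_eq_map (element : Int) (DS : List (List String)) :
    get_elements element DS = DS.map (fun row => PySem.List.pyGetD row element "") := by
  unfold get_elements
  rw [PySem.List.foldl_pyRange_zero_pyGetD' DS []
        (fun acc row => acc ++ [PySem.List.pyGetD row element ""]) []]
  simpa using PySem.List.foldl_append_singleton_eq_map (fun row => PySem.List.pyGetD row element "") DS []

-- A's branch-chain loop counts the entries outside {"0","3","4"}
lemma foldl_branch_count (xs : List String) (c : Int) :
    xs.foldl (fun count v =>
        if v = "0" then count
        else if v = "3" then count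
        else if v = "4" then count
        else count + 1) c
      = c + (xs.length : Int) - xs.count "0" - xs.count "3" - xs.count "4" := by
  induction xs generalizing c with
  | nil => simp
  | cons h t ih =>
    simp only [List.foldl_cons, List.count_cons, List.length_cons, ih]
    by_cases h0 : h = "0" <;> by_cases h3 : h = "3" <;> by_cases h4 : h = "4" <;>
      simp_all <;> try ring

-- ===== VERDICT (by name: the statement is the Claim_ definition above) =====
theorem TestMissValue_spec : Claim_equal_TestMissValue := by
  intro element DS _ _
  unfold Spec_TestMissValue TestMissValue TestMissValue_alt
  rw [get_elements_eq_map]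
  set xs := DS.map (fun row => PySem.List.pyGetD row element "") with hxs
  rw [PySem.List.foldl_pyRange_zero_pyGetD' xs ""
        (fun count v =>
          if v = "0" then count
          else if v = "3" then count
          else if v = "4" then count
          else count + 1) 0]
  rw [foldl_branch_count]
  have hc : ∀ v : String, (b_counter element DS).getD v 0 = (xs.count v : Int) := by
    intro v
    unfold b_counter
    rw [← List.foldl_map (f := fun row => PySem.List.pyGetD row element "")
          (g := fun (d : PySem.Dict String Int) (w : String) => d.insert w (d.getD w 0 + 1))]
    simpa using PySem.Dict.getD_foldl_insert_add_one
      (l := DS.map (fun row => PySem.List.pyGetD row element ""))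
      (d := (PySem.Dict.empty : PySem.Dict String Int)) (v := v)
  simp only [hc]
  have hl : xs.length = DS.length := by rw [hxs]; simp
  rw [hl]
  ring
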